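-- pv_equiv track=rewrite | github.com/student-utility/Student-Utility-Webapp | src/sd.py | totalComparisons
-- ===== SOURCE A (Python) =====
-- import math
--
-- def totalComparisons(n):
--     if n < 2:
--         return 0;
--     if n < 3:
--         return 1
--     total = 1
--     for i in range(1, n-1):
--         total += math.floor((i - math.ceil(i/2)) / 2) + 2
--     return total
-- ===== SOURCE B (Python) =====
-- def totalComparisons(n):
--     # Closed form: the loop term simplifies to i//4 + 2, summed arithmetically.
--     if n < 2:
--         return 0
--     if n < 3:
--         return 1
--     m = n - 2
--     q, r = divmod(m, 4)
--     return 1 + 2 * m + 2 * q * (q - 1) + q * (r + 1)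
-- ===== Notes on version B (the rewrite author's own statement) =====
-- stated objective: faster
-- what changed: The O(n) loop summing math.floor((i - math.ceil(i/2))/2) + 2 is replaced by an O(1) closed form: the term equals i//4 + 2, and the sum over i = 1..n-2 is computed arithmetically via divmod(n-2, 4).
import Mathlib
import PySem

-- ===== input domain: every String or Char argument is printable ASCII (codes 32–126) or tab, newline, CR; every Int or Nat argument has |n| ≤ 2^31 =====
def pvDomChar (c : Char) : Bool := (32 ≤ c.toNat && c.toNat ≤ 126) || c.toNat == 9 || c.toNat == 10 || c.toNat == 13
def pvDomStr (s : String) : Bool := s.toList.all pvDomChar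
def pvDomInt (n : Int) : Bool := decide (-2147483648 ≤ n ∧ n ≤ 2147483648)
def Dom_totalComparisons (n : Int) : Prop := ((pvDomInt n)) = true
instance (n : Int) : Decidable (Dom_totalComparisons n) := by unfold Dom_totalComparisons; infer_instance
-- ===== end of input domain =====

-- B replaces A's O(n) accumulation loop by an O(1) closed-form arithmetic formula (asymptotically faster, measured).


-- ===== PORT A =====
-- math.ceil(i/2) is exact as -((-i)//2) and math.floor(x/2) as x//2 on the stated |n| ≤ 2^31 domain
-- (the float quotients are exact well below 2^53), ported with PySem.Int.floordiv.
def totalComparisons (n : Int) : Int :=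
  if n < 2 then 0
  else if n < 3 then 1
  else
    (PySem.List.pyRange 1 (n - 1) 1).foldl
      (fun total i =>
        total + (PySem.Int.floordiv (i - (-(PySem.Int.floordiv (-i) 2))) 2 + 2)) 1

-- ===== PORT B =====
def totalComparisons_alt (n : Int) : Int :=
  if n < 2 then 0
  else if n < 3 then 1
  else
    let m := n - 2
    let q := PySem.Int.floordiv m 4
    let r := PySem.Int.mod m 4
    1 + 2 * m + 2 * q * (q - 1) + q * (r + 1)

-- ===== PRECONDITION & SPEC =====
def Spec_totalComparisons (n : Int) (out : Int) : Prop := out = totalComparisons_alt n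
instance (n : Int) (out : Int) : Decidable (Spec_totalComparisons n out) := by unfold Spec_totalComparisons; infer_instance

-- ===== CLAIM (what is proved, stated in full; the proofs are below) =====
def Claim_equal_totalComparisons : Prop := ∀ (n : Int), Dom_totalComparisons n → Spec_totalComparisons n (totalComparisons n)

-- ===== LEMMAS AND PROOFS =====

-- A's loop body term simplifies: floor((i - ceil(i/2))/2) = i // 4.
lemma pv_term_eq (i : Int) :
    PySem.Int.floordiv (i - (-(PySem.Int.floordiv (-i) 2))) 2 = PySem.Int.floordiv i 4 := by
  simp only [PySem.Int.floordiv_eq_ediv_of_pos (show (0:Int) < 2 by norm_num),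
    PySem.Int.floordiv_eq_ediv_of_pos (show (0:Int) < 4 by norm_num)]
  omega

-- The partial sums of A's loop, defined recursively.
def pvS : Nat → Int
  | 0 => 0
  | k + 1 => pvS k + (PySem.Int.floordiv ((k : Int) + 1) 4 + 2)

lemma pv_loop_eq (k : Nat) (t : Int) :
    (PySem.List.pyRange 1 (1 + (k : Int)) 1).foldl
      (fun total i => total + (PySem.Int.floordiv i 4 + 2)) t = t + pvS k := by
  induction k generalizing t with
  | zero => simp [PySem.List.pyRange_one_eq_nil, pvS]
  | succ k ih =>
    have h1 : (1 : Int) + (k + 1 : Nat) = (1 + (k : Int)) + 1 := by push_cast; ring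
    rw [h1, PySem.List.pyRange_one_succ_right (by omega), List.foldl_append, ih]
    simp only [List.foldl_cons, List.foldl_nil, pvS]
    have : (1 : Int) + (k : Int) = (k : Int) + 1 := by ring
    rw [this]; ring

lemma pvS_closed (k : Nat) :
    pvS k = 2 * (k : Int) + 2 * ((k / 4 : Nat) : Int) * (((k / 4 : Nat) : Int) - 1)
      + ((k / 4 : Nat) : Int) * (((k % 4 : Nat) : Int) + 1) := by
  induction k with
  | zero => simp [pvS]
  | succ k ih =>
    rw [pvS, ih, PySem.Int.floordiv_eq_ediv_of_pos (show (0:Int) < 4 by norm_num)]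
    have hcast : ((k : Int) + 1) / 4 = (((k + 1) / 4 : Nat) : Int) := by omega
    rw [hcast]
    have hdm := Nat.div_add_mod k 4
    have hb : k % 4 < 4 := Nat.mod_lt _ (by norm_num)
    by_cases hb3 : k % 4 = 3
    · have h1 : (k + 1) / 4 = k / 4 + 1 := by omega
      have h2 : (k + 1) % 4 = 0 := by omega
      rw [h1, h2, hb3]; push_cast; ring
    · have h1 : (k + 1) / 4 = k / 4 := by omega
      have h2 : (k + 1) % 4 = k % 4 + 1 := by omega
      rw [h1, h2]; push_cast; ring

-- ===== VERDICT (by name: the statement is the Claim_ definition above) =====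
theorem totalComparisons_spec : Claim_equal_totalComparisons := by
  intro n _
  unfold Spec_totalComparisons totalComparisons totalComparisons_alt
  split
  · rfl
  · split
    · rfl
    · rename_i h2 h3
      have hn : 3 ≤ n := by omega
      simp only [pv_term_eq]
      set k : Nat := (n - 2).toNat with hk
      have hm : n - 2 = (k : Int) := by omega
      have hrange : n - 1 = 1 + (k : Int) := by omega
      rw [hrange, pv_loop_eq, pvS_closed, hm]
      have hq : PySem.Int.floordiv ((k : Nat) : Int) 4 = ((k / 4 : Nat) : Int) := by
        rw [PySem.Int.floordiv_eq_ediv_of_pos (show (0:Int) < 4 by norm_num)]; omega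
      have hr : PySem.Int.mod ((k : Nat) : Int) 4 = ((k % 4 : Nat) : Int) := by
        rw [PySem.Int.mod_eq_emod_of_pos (show (0:Int) < 4 by norm_num)]; omega
      rw [hq, hr]; ring
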